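-- pv_equiv track=rewrite | github.com/denzoned/pm4py-distr | pm4pydistr/discovery/imd/detection_utils.py | infer_end_activities_from_succ_connections_and_current_dfg
-- ===== SOURCE A (Python) =====
-- def infer_end_activities_from_succ_connections_and_current_dfg(initial_dfg, dfg, activities, include_self=True):
--     """
--     Infer the end activities from the previous connections
--
--     Parameters
--     -----------
--     initial_dfg
--         Initial DFG
--     dfg
--         Directly-follows graph
--     activities
--         List of the activities contained in DFG
--     """
--     end_activities = set()
--     for el in initial_dfg:
--         if el[0][0] in activities and not el[0][1] in activities:
--             end_activities.add(el[0][0])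
--     if include_self:
--         end_activities = end_activities.union(set(infer_end_activities(dfg)))
--     return end_activities
--
-- def infer_end_activities(dfg):
--     """
--     Infer end activities from a Directly-Follows Graph
--
--     Parameters
--     ----------
--     dfg
--         Directly-Follows Graph
--
--     Returns
--     ----------
--     end_activities
--         End activities in the log
--     """
--     ingoing = get_ingoing_edges(dfg)
--     outgoing = get_outgoing_edges(dfg)
--
--     end_activities = []
--
--     for act in ingoing:
--         if act not in outgoing:
--             end_activities.append(act)
--
--     return end_activities
--
-- def get_outgoing_edges(dfg):
--     """
--     Gets outgoing edges of the provided DFG graph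
--     """
--     outgoing = {}
--     for el in dfg:
--         if type(el[0]) is str:
--             if not el[0] in outgoing:
--                 outgoing[el[0]] = {}
--             outgoing[el[0]][el[1]] = dfg[el]
--         else:
--             if not el[0][0] in outgoing:
--                 outgoing[el[0][0]] = {}
--             outgoing[el[0][0]][el[0][1]] = el[1]
--     return outgoing
--
-- def get_ingoing_edges(dfg):
--     """
--     Get ingoing edges of the provided DFG graph
--     """
--     ingoing = {}
--     for el in dfg:
--         if type(el[0]) is str:
--             if not el[1] in ingoing:
--                 ingoing[el[1]] = {}
--             ingoing[el[1]][el[0]] = dfg[el]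
--         else:
--             if not el[0][1] in ingoing:
--                 ingoing[el[0][1]] = {}
--             ingoing[el[0][1]][el[0][0]] = el[1]
--     return ingoing
-- ===== SOURCE B (Python) =====
-- def infer_end_activities_from_succ_connections_and_current_dfg(initial_dfg, dfg, activities, include_self=True):
--     acts = set(activities)
--     end_activities = {el[0][0] for el in initial_dfg
--                       if el[0][0] in acts and el[0][1] not in acts}
--     if include_self:
--         # one pass over the DFG keeping a single flag per activity:
--         # True once it is seen as an edge source, False while only seen as a target
--         is_source = {}
--         for el in dfg:
--             a, b = el if type(el[0]) is str else el[0]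
--             is_source[a] = True
--             is_source.setdefault(b, False)
--         end_activities |= {act for act, flagged in is_source.items() if not flagged}
--     return end_activities
-- ===== Notes on version B (the rewrite author's own statement) =====
-- stated objective: faster
-- what changed: B drops A's two nested ingoing/outgoing adjacency dicts and the membership scan over them, keeping instead a single seen-as-source boolean flag per activity in one pass over the DFG (ends = keys still flagged False), and hashes activities into a set once so the initial_dfg filter no longer does list membership per edge.
import Mathlib
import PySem

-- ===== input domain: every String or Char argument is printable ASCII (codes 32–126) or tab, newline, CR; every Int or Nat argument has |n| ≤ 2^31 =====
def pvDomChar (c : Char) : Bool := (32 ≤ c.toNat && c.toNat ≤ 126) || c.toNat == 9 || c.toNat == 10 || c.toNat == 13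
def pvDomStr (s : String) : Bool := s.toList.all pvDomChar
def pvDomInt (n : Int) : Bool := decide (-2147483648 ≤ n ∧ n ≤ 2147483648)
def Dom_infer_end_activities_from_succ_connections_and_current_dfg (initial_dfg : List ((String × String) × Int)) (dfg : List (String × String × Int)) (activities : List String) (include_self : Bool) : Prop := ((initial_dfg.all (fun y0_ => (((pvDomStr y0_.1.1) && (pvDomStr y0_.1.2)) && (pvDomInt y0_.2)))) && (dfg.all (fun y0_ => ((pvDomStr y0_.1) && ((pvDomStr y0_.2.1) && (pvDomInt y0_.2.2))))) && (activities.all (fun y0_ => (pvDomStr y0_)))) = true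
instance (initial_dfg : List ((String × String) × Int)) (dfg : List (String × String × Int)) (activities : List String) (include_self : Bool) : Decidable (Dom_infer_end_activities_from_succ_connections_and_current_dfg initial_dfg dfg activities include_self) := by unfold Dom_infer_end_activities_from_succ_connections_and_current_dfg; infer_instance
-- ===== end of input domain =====

-- B replaces A's two nested ingoing/outgoing adjacency dicts and the scan over them by ONE pass over the
-- DFG keeping a single boolean flag per activity (seen-as-source), and hashes `activities` into a set once.

-- ===== PORT A =====
-- A-side helpers: literal ports of get_ingoing_edges / get_outgoing_edges / infer_end_activities.
-- dfg reaches Python as a dict {(a,b): c}; iterating it yields keys (a,b) with el[0] a str, so only the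
-- str-branch of get_*_edges runs and dfg[el] is the entry's own count c.
def pvGetIngoingEdges (dfg : List (String × String × Int)) : PySem.Dict String (PySem.Dict String Int) :=
  dfg.foldl (fun d el => d.modify el.2.1 PySem.Dict.empty (fun inner => inner.insert el.1 el.2.2)) PySem.Dict.empty

def pvGetOutgoingEdges (dfg : List (String × String × Int)) : PySem.Dict String (PySem.Dict String Int) :=
  dfg.foldl (fun d el => d.modify el.1 PySem.Dict.empty (fun inner => inner.insert el.2.1 el.2.2)) PySem.Dict.empty

def pvInferEndActivities (dfg : List (String × String × Int)) : List String :=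
  (pvGetIngoingEdges dfg).keys.foldl
    (fun acc act => if !((pvGetOutgoingEdges dfg).contains act) then acc ++ [act] else acc) []

def infer_end_activities_from_succ_connections_and_current_dfg (initial_dfg : List ((String × String) × Int)) (dfg : List (String × String × Int)) (activities : List String) (include_self : Bool) : List String :=
  let end_activities : PySem.Set String :=
    initial_dfg.foldl (fun s el => if el.1.1 ∈ activities ∧ el.1.2 ∉ activities then PySem.Set.add s el.1.1 else s) PySem.Set.empty
  if include_self then PySem.Set.union end_activities (PySem.Set.ofList (pvInferEndActivities dfg))
  else end_activities

-- ===== PORT B =====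
-- as in A's port, dfg is a Python dict {(a,b): c}, so `a, b = el` (the str branch) is the path taken.
def infer_end_activities_from_succ_connections_and_current_dfg_alt (initial_dfg : List ((String × String) × Int)) (dfg : List (String × String × Int)) (activities : List String) (include_self : Bool) : List String :=
  let acts : PySem.Set String := PySem.Set.ofList activities
  let end_activities : PySem.Set String :=
    PySem.Set.ofList ((initial_dfg.filter (fun el => acts.contains el.1.1 && !acts.contains el.1.2)).map (fun el => el.1.1))
  if include_self then
    let is_source : PySem.Dict String Bool :=
      dfg.foldl (fun d el => (d.insert el.1 true).setdefault el.2.1 false) PySem.Dict.empty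
    PySem.Set.union end_activities (((is_source.items).filter (fun p => !p.2)).map (fun p => p.1))
  else end_activities

-- ===== PRECONDITION & SPEC =====
def Spec_infer_end_activities_from_succ_connections_and_current_dfg (initial_dfg : List ((String × String) × Int)) (dfg : List (String × String × Int)) (activities : List String) (include_self : Bool) (out : List String) : Prop := out = infer_end_activities_from_succ_connections_and_current_dfg_alt initial_dfg dfg activities include_self
instance (initial_dfg : List ((String × String) × Int)) (dfg : List (String × String × Int)) (activities : List String) (include_self : Bool) (out : List String) : Decidable (Spec_infer_end_activities_from_succ_connections_and_current_dfg initial_dfg dfg activities include_self out) := by unfold Spec_infer_end_activities_from_succ_connections_and_current_dfg; infer_instance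

-- ===== CLAIM (what is proved, stated in full; the proofs are below) =====
def Claim_equal_infer_end_activities_from_succ_connections_and_current_dfg : Prop := ∀ (initial_dfg : List ((String × String) × Int)) (dfg : List (String × String × Int)) (activities : List String) (include_self : Bool), Dom_infer_end_activities_from_succ_connections_and_current_dfg initial_dfg dfg activities include_self → Spec_infer_end_activities_from_succ_connections_and_current_dfg initial_dfg dfg activities include_self (infer_end_activities_from_succ_connections_and_current_dfg initial_dfg dfg activities include_self)

-- ===== LEMMAS AND PROOFS =====

-- the two initial_dfg passes build the same set
theorem pv_initial_fold (activities : List String) (l : List ((String × String) × Int)) (s : PySem.Set String) :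
    l.foldl (fun s el => if el.1.1 ∈ activities ∧ el.1.2 ∉ activities then PySem.Set.add s el.1.1 else s) s
      = PySem.Set.update s ((l.filter (fun el => (PySem.Set.ofList activities).contains el.1.1 && !(PySem.Set.ofList activities).contains el.1.2)).map (fun el => el.1.1)) := by
  induction l generalizing s with
  | nil => simp [PySem.Set.update]
  | cons el rest ih =>
    by_cases h1 : el.1.1 ∈ activities <;> by_cases h2 : el.1.2 ∈ activities <;>
      simp [List.foldl_cons, h1, h2, ih, PySem.Set.update_cons,
            PySem.Set.contains_eq_decide, PySem.Set.mem_ofList]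

-- A side: infer_end_activities dfg = targets-minus-sources as a filtered dedup list
theorem pv_ingoing_keys (dfg : List (String × String × Int)) :
    (pvGetIngoingEdges dfg).keys = PySem.Set.ofList (dfg.map (fun el => el.2.1)) := by
  unfold pvGetIngoingEdges
  rw [PySem.Dict.keys_foldl_modify_key dfg (fun el => el.2.1) PySem.Dict.empty
        (fun d el => fun inner => inner.insert el.1 el.2.2)]
  simp [PySem.Set.update_nil_left]

theorem pv_outgoing_contains (dfg : List (String × String × Int)) (act : String) :
    (pvGetOutgoingEdges dfg).contains act = decide (act ∈ dfg.map (fun el => el.1)) := by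
  unfold pvGetOutgoingEdges
  rw [PySem.Dict.contains_eq_decide_mem_keys,
      PySem.Dict.keys_foldl_modify_key dfg (fun el => el.1) PySem.Dict.empty
        (fun d el => fun inner => inner.insert el.2.1 el.2.2)]
  simp [PySem.Set.update_nil_left, PySem.Set.mem_ofList]

theorem pv_infer_end_eq (dfg : List (String × String × Int)) :
    pvInferEndActivities dfg
      = (PySem.Set.ofList (dfg.map (fun el => el.2.1))).filter
          (fun x => !decide (x ∈ dfg.map (fun el => el.1))) := by
  unfold pvInferEndActivities
  rw [show (fun (acc : List String) act => if !((pvGetOutgoingEdges dfg).contains act) then acc ++ [act] else acc)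
        = (fun acc act => if (!decide (act ∈ dfg.map (fun el => el.1))) = true then acc ++ [id act] else acc) from by
      funext acc act; rw [pv_outgoing_contains]; rfl]
  rw [PySem.List.foldl_append_if, pv_ingoing_keys]
  simp

-- B side: the is_source dict after the one-pass fold
theorem pv_status_keys (l : List (String × String × Int)) (d : PySem.Dict String Bool) :
    (l.foldl (fun d el => (d.insert el.1 true).setdefault el.2.1 false) d).keys
      = PySem.Set.update d.keys (l.flatMap (fun el => [el.1, el.2.1])) := by
  induction l generalizing d with
  | nil => simp [PySem.Set.update]
  | cons el rest ih =>
    rw [List.foldl_cons, ih]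
    have hk : ((d.insert el.1 true).setdefault el.2.1 false).keys
        = PySem.Set.add (PySem.Set.add d.keys el.1) el.2.1 := by
      rw [PySem.Dict.keys_setdefault, PySem.Dict.contains_eq_decide_mem_keys]
      by_cases ha : el.1 ∈ d.keys <;>
        by_cases hb : el.2.1 ∈ d.keys <;>
        simp [PySem.Dict.keys_insert_of_contains, PySem.Dict.keys_insert_of_not_contains,
              PySem.Dict.contains_eq_decide_mem_keys, ha, hb,
              PySem.Set.add_of_mem, PySem.Set.add_of_not_mem, PySem.Set.mem_add] <;>
        by_cases hab : el.2.1 = el.1 <;>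
        simp_all [PySem.Set.add_of_mem, PySem.Set.add_of_not_mem, PySem.Set.mem_add]
    rw [hk]
    simp [PySem.Set.update_cons]

theorem pv_status_getD (l : List (String × String × Int)) (d : PySem.Dict String Bool) (x : String) :
    (l.foldl (fun d el => (d.insert el.1 true).setdefault el.2.1 false) d).getD x false
      = (d.getD x false || decide (x ∈ l.map (fun el => el.1))) := by
  induction l generalizing d with
  | nil => simp
  | cons el rest ih =>
    rw [List.foldl_cons, ih]
    have hstep : ((d.insert el.1 true).setdefault el.2.1 false).getD x false
        = (d.getD x false || decide (x = el.1)) := by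
      by_cases hb : x = el.2.1
      · subst hb
        rw [PySem.Dict.getD_setdefault_self, PySem.Dict.getD_insert]
        by_cases ha : el.2.1 = el.1 <;> simp [ha, Bool.or_comm]
      · rw [PySem.Dict.getD_eq_get?_getD, PySem.Dict.get?_setdefault_of_ne _ _ hb,
            ← PySem.Dict.getD_eq_get?_getD, PySem.Dict.getD_insert]
        by_cases ha : x = el.1 <;> simp [ha]
    rw [hstep]
    by_cases hx : x = el.1
    · simp [hx]
    · simp only [List.map_cons, List.mem_cons, hx, false_or, decide_false, Bool.or_false, Bool.false_or]

-- filtering commutes with python-set construction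
theorem pv_filter_add (s : PySem.Set String) (x : String) (p : String → Bool) :
    (PySem.Set.add s x).filter p = (if p x then PySem.Set.add (s.filter p) x else s.filter p) := by
  rw [PySem.Set.add_eq_ite, PySem.Set.add_eq_ite]
  by_cases hx : x ∈ s <;> by_cases hp : p x <;>
    simp [hx, hp, List.filter_append, List.mem_filter]

theorem pv_filter_update (p : String → Bool) (l : List String) (s : PySem.Set String) :
    (PySem.Set.update s l).filter p = PySem.Set.update (s.filter p) (l.filter p) := by
  induction l generalizing s with
  | nil => simp [PySem.Set.update]
  | cons x rest ih =>
    rw [PySem.Set.update_cons, ih, pv_filter_add]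
    by_cases hp : p x <;> simp [hp, PySem.Set.update_cons]

theorem pv_filter_ofList (p : String → Bool) (l : List String) :
    (PySem.Set.ofList l).filter p = PySem.Set.ofList (l.filter p) := by
  rw [← PySem.Set.update_nil_left, pv_filter_update, ← PySem.Set.update_nil_left]
  rfl

-- among non-sources, interleaved first occurrences coincide with first target occurrences
theorem pv_flat_filter (dfg : List (String × String × Int)) (S : List String)
    (h : ∀ el ∈ dfg, el.1 ∈ S) :
    (dfg.flatMap (fun el => [el.1, el.2.1])).filter (fun x => !decide (x ∈ S))
      = (dfg.map (fun el => el.2.1)).filter (fun x => !decide (x ∈ S)) := by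
  induction dfg with
  | nil => rfl
  | cons el rest ih =>
    have ha : el.1 ∈ S := h el (by simp)
    simp only [List.flatMap_cons, List.map_cons, List.cons_append, List.nil_append,
               List.filter_cons, decide_eq_true ha, Bool.not_true, Bool.not_false, if_false]
    have := ih (fun e he => h e (by simp [he]))
    by_cases hb : el.2.1 ∈ S <;> simp [hb, this]

-- the B-side dfg pass produces exactly A's infer_end_activities list
theorem pv_dfg_pass_eq (dfg : List (String × String × Int)) :
    ((((dfg.foldl (fun d el => (d.insert el.1 true).setdefault el.2.1 false) PySem.Dict.empty).items).filter
        (fun p => !p.2)).map (fun p => p.1))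
      = pvInferEndActivities dfg := by
  set D := dfg.foldl (fun d el => (d.insert el.1 true).setdefault el.2.1 false) PySem.Dict.empty with hD
  have hkeys : D.keys = PySem.Set.ofList (dfg.flatMap (fun el => [el.1, el.2.1])) := by
    rw [hD, pv_status_keys]; simp [PySem.Set.update_nil_left]
  have hnd : D.keys.Nodup := by rw [hkeys]; exact PySem.Set.nodup_ofList _
  rw [PySem.Dict.items_eq_map_keys D hnd false, List.filter_map, List.map_map]
  have hfun : ((fun p => !p.2) ∘ fun k => (k, D.getD k false))
      = fun k => !decide (k ∈ dfg.map (fun el => el.1)) := by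
    funext k
    simp only [Function.comp]
    rw [hD, pv_status_getD]
    simp
  rw [hfun]
  have hg : ((fun p => p.1) ∘ fun k => (k, D.getD k false)) = id := by funext k; rfl
  rw [hg, List.map_id, hkeys, pv_filter_ofList, pv_flat_filter dfg _ (fun el he => List.mem_map_of_mem he),
      ← pv_filter_ofList, pv_infer_end_eq]

-- ===== VERDICT (by name: the statement is the Claim_ definition above) =====
theorem infer_end_activities_from_succ_connections_and_current_dfg_spec : Claim_equal_infer_end_activities_from_succ_connections_and_current_dfg := by
  intro initial_dfg dfg activities include_self _
  unfold Spec_infer_end_activities_from_succ_connections_and_current_dfg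
  unfold infer_end_activities_from_succ_connections_and_current_dfg infer_end_activities_from_succ_connections_and_current_dfg_alt
  rw [pv_initial_fold]
  simp only [PySem.Set.empty, PySem.Set.update_nil_left]
  cases include_self
  · simp only [Bool.false_eq_true, if_false]
  · have hnd : (pvInferEndActivities dfg).Nodup := by
      rw [pv_infer_end_eq]; exact (PySem.Set.nodup_ofList _).filter _
    simp only [if_true]
    rw [pv_dfg_pass_eq, PySem.Set.ofList_eq_self_of_nodup _ hnd]
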